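-- pv_equiv track=rewrite | github.com/hansmeijs/awpr | awpr/students/functions.py | get_firstname_initials
-- ===== SOURCE A (Python) =====
-- def get_firstname_initials(first_name):  # PR2021-07-26
--     firstname_initials = ''
--     first_name = first_name.strip() if first_name else ''
--     if first_name:
--         # strings '', ' ' and '   ' give empty list [] which is False
--         firstnames_arr = first_name.split()
--         if firstnames_arr:
--             skip = False
--             for item in firstnames_arr:
--                 if not skip:
--                     firstname_initials += item + ' '  # write first firstname in full
--                     skip = True
--                 else:
--                     if item:
--                         # PR2017-02-18 VB debug. bij dubbele spatie in voornaam krijg je lege err(x)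
--                         firstname_initials += item[:1] + '.'  # write of the next firstnames only the first letter
--     return firstname_initials
-- ===== SOURCE B (Python) =====
-- def get_firstname_initials(first_name):
--     # One character-level pass (state machine), no split(): copy the first word,
--     # emit initial+'.' for each later word, ignore all other characters.
--     out = []
--     state = 0  # 0 before first word, 1 in first word, 2 between words, 3 in later word
--     for c in (first_name or ''):
--         if c.isspace():
--             if state == 1:
--                 out.append(' ')
--                 state = 2
--             elif state == 3:
--                 state = 2
--         else:
--             if state == 0 or state == 1:
--                 out.append(c)
--                 state = 1
--             elif state == 2:
--                 out.append(c)
--                 out.append('.')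
--                 state = 3
--     if state == 1:
--         out.append(' ')
--     return ''.join(out)
-- ===== Notes on version B (the rewrite author's own statement) =====
-- stated objective: alternative
-- what changed: Replaces A's strip/split/skip-flag pipeline (build a word list, then fold over it) by a single character-level state machine that never splits: one pass over the characters with four states (before first word / in first word / between words / in a later word), emitting the first word verbatim and a dotted initial for each later word.
import Mathlib
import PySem

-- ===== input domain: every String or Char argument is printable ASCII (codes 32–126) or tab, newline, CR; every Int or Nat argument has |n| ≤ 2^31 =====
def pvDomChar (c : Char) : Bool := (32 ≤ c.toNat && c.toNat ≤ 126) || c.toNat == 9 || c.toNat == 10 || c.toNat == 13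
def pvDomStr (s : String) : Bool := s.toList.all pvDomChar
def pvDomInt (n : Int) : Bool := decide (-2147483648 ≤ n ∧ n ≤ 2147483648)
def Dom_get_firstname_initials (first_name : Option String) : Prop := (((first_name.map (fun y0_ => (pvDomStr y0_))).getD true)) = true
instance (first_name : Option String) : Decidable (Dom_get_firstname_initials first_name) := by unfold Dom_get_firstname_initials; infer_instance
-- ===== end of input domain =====

-- B replaces A's strip/split/skip-flag pipeline by a single character-level state machine
-- (no split at all); objective: alternative decomposition, no speed claim.

-- ===== PORT A =====
-- Literal transliteration of A over the code points (PySem.Chars works on List Char; Lean's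
-- own String.append is opaque to the kernel, so concatenation is done on List Char and the
-- result wrapped with String.ofList at the end).
def get_firstname_initials (first_name : Option String) : String :=
  -- first_name = first_name.strip() if first_name else ''   (falsy: None or '')
  let fn : List Char :=
    match first_name with
    | some s => if s.toList ≠ [] then PySem.Chars.strip s.toList else []
    | none => []
  if fn ≠ [] then
    let firstnames_arr := PySem.Chars.split₀ fn
    if firstnames_arr ≠ [] then
      -- for item in firstnames_arr: skip-flag accumulation
      String.ofList
        (firstnames_arr.foldl
          (fun (st : List Char × Bool) item =>
            if st.2 = false then
              (st.1 ++ item ++ [' '], true)                                    -- initials += item + ' '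
            else if item ≠ [] then
              (st.1 ++ PySem.List.slice item none (some 1) ++ ['.'], st.2)     -- initials += item[:1] + '.'
            else st)
          ([], false)).1
    else ""
  else ""

-- ===== PORT B =====
-- state: 0 = before first word, 1 = inside first word, 2 = between words, 3 = inside a later word
def pvStep (st : List Char × Nat) (c : Char) : List Char × Nat :=
  if PySem.Chars.isspace c then
    if st.2 = 1 then (st.1 ++ [' '], 2)
    else if st.2 = 3 then (st.1, 2)
    else st
  else
    if st.2 = 0 ∨ st.2 = 1 then (st.1 ++ [c], 1)
    else if st.2 = 2 then (st.1 ++ [c, '.'], 3)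
    else st

-- trailing "if state == 1: out.append(' ')"
def pvFinal (st : List Char × Nat) : List Char :=
  if st.2 = 1 then st.1 ++ [' '] else st.1

def get_firstname_initials_alt (first_name : Option String) : String :=
  -- for c in (first_name or ''): one pass of the state machine, then ''.join(out)
  String.ofList (pvFinal ((first_name.getD "").toList.foldl pvStep ([], 0)))

-- ===== PRECONDITION & SPEC =====
def Spec_get_firstname_initials (first_name : Option String) (out : String) : Prop := out = get_firstname_initials_alt first_name
instance (first_name : Option String) (out : String) : Decidable (Spec_get_firstname_initials first_name out) := by unfold Spec_get_firstname_initials; infer_instance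

-- ===== CLAIM (what is proved, stated in full; the proofs are below) =====
def Claim_equal_get_firstname_initials : Prop := ∀ (first_name : Option String), Dom_get_firstname_initials first_name → Spec_get_firstname_initials first_name (get_firstname_initials first_name)

-- ===== LEMMAS AND PROOFS =====

-- the initials block contributed by the words after the first
def pvG (ws : List (List Char)) : List Char := (ws.map (fun w => w.take 1 ++ ['.'])).flatten

-- the full result as a function of the word list
def pvF : List (List Char) → List Char
  | [] => []
  | p :: ws => p ++ ' ' :: pvG ws

-- split() ignores leading whitespace
theorem pv_go_lstrip (s : List Char) (acc : List (List Char)) :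
    PySem.Chars.split₀.go (List.dropWhile PySem.Chars.isspace s) [] acc
      = PySem.Chars.split₀.go s [] acc := by
  induction s generalizing acc with
  | nil => rfl
  | cons c rest ih =>
      by_cases h : PySem.Chars.isspace c = true
      · simpa [List.dropWhile, h, PySem.Chars.split₀.go] using ih acc
      · simp [List.dropWhile, h]

-- a run of whitespace at the end of the input behaves like end-of-input
theorem pv_go_spaces (ws : List Char) (cur : List Char) (acc : List (List Char))
    (h : ∀ c ∈ ws, PySem.Chars.isspace c = true) :
    PySem.Chars.split₀.go ws cur acc = PySem.Chars.split₀.go [] cur acc := by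
  induction ws generalizing cur acc with
  | nil => rfl
  | cons c rest ih =>
      have hc : PySem.Chars.isspace c = true := h c (by simp)
      have hrest : ∀ c ∈ rest, PySem.Chars.isspace c = true := fun c hcm => h c (by simp [hcm])
      by_cases hcur : cur.isEmpty = true
      · simp [PySem.Chars.split₀.go, hc, hcur, ih _ _ hrest]
      · simp [PySem.Chars.split₀.go, hc, hcur, ih _ _ hrest]

-- split() ignores trailing whitespace
theorem pv_go_rstrip (t ws : List Char) (cur : List Char) (acc : List (List Char))
    (h : ∀ c ∈ ws, PySem.Chars.isspace c = true) :
    PySem.Chars.split₀.go (t ++ ws) cur acc = PySem.Chars.split₀.go t cur acc := by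
  induction t generalizing cur acc with
  | nil => simpa using pv_go_spaces ws cur acc h
  | cons c rest ih =>
      by_cases hc : PySem.Chars.isspace c = true
      · by_cases hcur : cur.isEmpty = true
        · simp [PySem.Chars.split₀.go, hc, hcur, ih]
        · simp [PySem.Chars.split₀.go, hc, hcur, ih]
      · simp [PySem.Chars.split₀.go, hc, ih]

-- split(strip s) = split s
theorem pv_split₀_strip (s : List Char) :
    PySem.Chars.split₀ (PySem.Chars.strip s) = PySem.Chars.split₀ s := by
  unfold PySem.Chars.strip PySem.Chars.split₀
  set u := PySem.Chars.lstrip s with hu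
  have hdecomp : u = PySem.Chars.rstrip u ++ (List.takeWhile PySem.Chars.isspace u.reverse).reverse := by
    unfold PySem.Chars.rstrip
    rw [← List.reverse_append, List.takeWhile_append_dropWhile, List.reverse_reverse]
  have hws : ∀ c ∈ (List.takeWhile PySem.Chars.isspace u.reverse).reverse, PySem.Chars.isspace c = true := by
    intro c hc
    exact List.mem_takeWhile_imp (by simpa using hc)
  calc PySem.Chars.split₀.go (PySem.Chars.rstrip u) [] []
      = PySem.Chars.split₀.go (PySem.Chars.rstrip u ++ (List.takeWhile PySem.Chars.isspace u.reverse).reverse) [] [] :=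
        (pv_go_rstrip _ _ _ _ hws).symm
    _ = PySem.Chars.split₀.go u [] [] := by rw [← hdecomp]
    _ = PySem.Chars.split₀.go s [] [] := by rw [hu]; exact pv_go_lstrip s []

-- tokens produced by split() are nonempty
theorem pv_go_tokens_nonempty (s : List Char) (cur : List Char) (acc : List (List Char))
    (hacc : ∀ t ∈ acc, t ≠ []) :
    ∀ t ∈ PySem.Chars.split₀.go s cur acc, t ≠ [] := by
  induction s generalizing cur acc with
  | nil =>
      intro t ht
      by_cases hcur : cur.isEmpty = true
      · simp only [PySem.Chars.split₀.go, hcur, if_pos] at ht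
        exact hacc t (by simpa using ht)
      · simp [PySem.Chars.split₀.go, hcur] at ht
        rcases ht with h | h
        · exact hacc t h
        · subst h; simp [List.isEmpty_iff] at hcur ⊢; simpa using hcur
  | cons c rest ih =>
      intro t ht
      by_cases hc : PySem.Chars.isspace c = true
      · by_cases hcur : cur.isEmpty = true
        · simp only [PySem.Chars.split₀.go, hc, hcur, if_pos] at ht
          exact ih [] acc hacc t ht
        · simp only [PySem.Chars.split₀.go, hc, hcur] at ht
          refine ih [] (cur.reverse :: acc) ?_ t ht
          intro u hu
          rcases List.mem_cons.mp hu with h | h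
          · subst h; simp [List.isEmpty_iff] at hcur ⊢; simpa using hcur
          · exact hacc u h
      · simp only [PySem.Chars.split₀.go, hc] at ht
        exact ih (c :: cur) acc hacc t ht

theorem pv_split₀_tokens_nonempty (s : List Char) :
    ∀ t ∈ PySem.Chars.split₀ s, t ≠ [] :=
  pv_go_tokens_nonempty s [] [] (by simp)

-- the skip=true tail of A's fold is the initials block pvG
theorem pv_fold_tail (rest : List (List Char)) (acc : List Char)
    (h : ∀ x ∈ rest, x ≠ []) :
    (rest.foldl
      (fun (st : List Char × Bool) item =>
        if st.2 = false then
          (st.1 ++ item ++ [' '], true)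
        else if item ≠ [] then
          (st.1 ++ PySem.List.slice item none (some 1) ++ ['.'], st.2)
        else st)
      (acc, true)).1
      = acc ++ pvG rest := by
  induction rest generalizing acc with
  | nil => simp [pvG]
  | cons x rs ih =>
      have hx : x ≠ [] := h x (by simp)
      have hrs : ∀ y ∈ rs, y ≠ [] := fun y hy => h y (by simp [hy])
      simp only [List.foldl_cons, if_neg (by simp : ¬ (true = false)), if_pos hx]
      rw [ih _ hrs]
      have hslice : PySem.List.slice x none (some (1 : Int)) = x.take 1 := by
        simpa using PySem.List.slice_to x (b := 1) (by norm_num)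
      simp [pvG, hslice, List.append_assoc]

-- the accumulator of split₀.go is a reversed prefix of the result
theorem pv_go_acc (s : List Char) (cur : List Char) (acc : List (List Char)) :
    PySem.Chars.split₀.go s cur acc = acc.reverse ++ PySem.Chars.split₀.go s cur [] := by
  induction s generalizing cur acc with
  | nil =>
      by_cases hcur : cur.isEmpty = true
      · simp [PySem.Chars.split₀.go, hcur]
      · simp [PySem.Chars.split₀.go, hcur]
  | cons c rest ih =>
      by_cases hc : PySem.Chars.isspace c = true
      · by_cases hcur : cur.isEmpty = true
        · simp only [PySem.Chars.split₀.go, hc, hcur, if_pos]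
          exact ih [] acc
        · simp only [PySem.Chars.split₀.go, hc, hcur, Bool.false_eq_true, if_pos, if_false]
          rw [ih [] (cur.reverse :: acc), ih [] [cur.reverse]]
          simp
      · simp only [PySem.Chars.split₀.go, hc, Bool.false_eq_true, if_false]
        exact ih (c :: cur) acc

-- inside a word, split₀.go completes the current word with the non-space prefix
theorem pv_go_word (s : List Char) (cur : List Char) (hcur : cur ≠ []) :
    PySem.Chars.split₀.go s cur []
      = (cur.reverse ++ s.takeWhile (fun c => !PySem.Chars.isspace c))
          :: PySem.Chars.split₀.go (s.dropWhile (fun c => !PySem.Chars.isspace c)) [] [] := by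
  induction s generalizing cur with
  | nil =>
      have : cur.isEmpty = false := by simpa [List.isEmpty_iff] using hcur
      simp [PySem.Chars.split₀.go, this]
  | cons c rest ih =>
      have hcurE : cur.isEmpty = false := by simpa [List.isEmpty_iff] using hcur
      by_cases hc : PySem.Chars.isspace c = true
      · simp only [PySem.Chars.split₀.go, hc, hcurE, if_pos, Bool.false_eq_true, if_false]
        rw [pv_go_acc rest [] [cur.reverse]]
        simp [List.takeWhile, List.dropWhile, hc, PySem.Chars.split₀.go]
      · have hc' : PySem.Chars.isspace c = false := by simpa using hc
        simp only [PySem.Chars.split₀.go, hc', Bool.false_eq_true, if_false]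
        rw [ih (c :: cur) (by simp)]
        simp [List.takeWhile, List.dropWhile, hc']

-- one step of the scanner, by state and character class
theorem pv_step_sp (c : Char) (hc : PySem.Chars.isspace c = true) (out : List Char) :
    pvStep (out, 0) c = (out, 0) ∧ pvStep (out, 1) c = (out ++ [' '], 2)
    ∧ pvStep (out, 2) c = (out, 2) ∧ pvStep (out, 3) c = (out, 2) := by
  refine ⟨?_, ?_, ?_, ?_⟩ <;> simp [pvStep, hc]

theorem pv_step_ch (c : Char) (hc : PySem.Chars.isspace c = false) (out : List Char) :
    pvStep (out, 0) c = (out ++ [c], 1) ∧ pvStep (out, 1) c = (out ++ [c], 1)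
    ∧ pvStep (out, 2) c = (out ++ [c, '.'], 3) ∧ pvStep (out, 3) c = (out, 3) := by
  refine ⟨?_, ?_, ?_, ?_⟩ <;> simp [pvStep, hc]

-- the state-machine invariant: each scanner state against the word structure of the rest
theorem pv_scan (s : List Char) :
    (pvFinal (s.foldl pvStep ([], 0)) = pvF (PySem.Chars.split₀.go s [] []))
    ∧ (∀ cur : List Char, cur ≠ [] →
        pvFinal (s.foldl pvStep (cur.reverse, 1))
          = (cur.reverse ++ s.takeWhile (fun c => !PySem.Chars.isspace c))
              ++ ' ' :: pvG (PySem.Chars.split₀.go (s.dropWhile (fun c => !PySem.Chars.isspace c)) [] []))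
    ∧ (∀ out : List Char,
        pvFinal (s.foldl pvStep (out, 2)) = out ++ pvG (PySem.Chars.split₀.go s [] []))
    ∧ (∀ out : List Char,
        pvFinal (s.foldl pvStep (out, 3))
          = out ++ pvG (PySem.Chars.split₀.go (s.dropWhile (fun c => !PySem.Chars.isspace c)) [] [])) := by
  induction s with
  | nil =>
      refine ⟨by simp [pvFinal, pvF, PySem.Chars.split₀.go], ?_, ?_, ?_⟩
      · intro cur _
        simp [pvFinal, PySem.Chars.split₀.go, pvG]
      · intro out; simp [pvFinal, PySem.Chars.split₀.go, pvG]
      · intro out; simp [pvFinal, PySem.Chars.split₀.go, pvG]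
  | cons c rest ih =>
      obtain ⟨ih0, ih1, ih2, ih3⟩ := ih
      by_cases hc : PySem.Chars.isspace c = true
      · refine ⟨?_, ?_, ?_, ?_⟩
        · simp only [List.foldl_cons, (pv_step_sp c hc _).1]
          simp only [PySem.Chars.split₀.go, hc, if_pos, List.isEmpty_nil]
          exact ih0
        · intro cur hcur
          simp only [List.foldl_cons, (pv_step_sp c hc _).2.1]
          have hcurE : cur.isEmpty = false := by simpa [List.isEmpty_iff] using hcur
          simp only [List.takeWhile_cons, List.dropWhile_cons, hc, Bool.not_true,
            Bool.false_eq_true, if_false]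
          simp only [PySem.Chars.split₀.go, hc, if_pos]
          -- scanner: state 1, space → emit ' ', go to state 2
          have := ih2 (cur.reverse ++ [' '])
          simpa [List.append_assoc] using this
        · intro out
          simp only [List.foldl_cons, (pv_step_sp c hc _).2.2.1]
          simp only [PySem.Chars.split₀.go, hc, if_pos, List.isEmpty_nil]
          exact ih2 out
        · intro out
          simp only [List.foldl_cons, (pv_step_sp c hc _).2.2.2]
          simp only [List.dropWhile_cons, hc, Bool.not_true, Bool.false_eq_true, if_false]
          simp only [PySem.Chars.split₀.go, hc, if_pos, List.isEmpty_nil]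
          exact ih2 out
      · have hc' : PySem.Chars.isspace c = false := by simpa using hc
        refine ⟨?_, ?_, ?_, ?_⟩
        · simp only [List.foldl_cons, (pv_step_ch c hc' _).1, List.nil_append]
          simp only [PySem.Chars.split₀.go, hc', Bool.false_eq_true, if_false]
          rw [pv_go_word rest [c] (by simp)]
          have h1 := ih1 [c] (by simp)
          simp only [List.reverse_singleton] at h1
          rw [h1]
          simp [pvF]
        · intro cur hcur
          simp only [List.foldl_cons, (pv_step_ch c hc' _).2.1]
          simp only [List.takeWhile, List.dropWhile, hc']
          have := ih1 (c :: cur) (by simp)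
          simp only [List.reverse_cons] at this
          simpa [List.append_assoc] using this
        · intro out
          simp only [List.foldl_cons, (pv_step_ch c hc' _).2.2.1]
          simp only [PySem.Chars.split₀.go, hc', Bool.false_eq_true, if_false]
          rw [pv_go_word rest [c] (by simp)]
          have := ih3 (out ++ [c, '.'])
          simpa [pvG, List.append_assoc] using this
        · intro out
          simp only [List.foldl_cons, (pv_step_ch c hc' _).2.2.2]
          simp only [List.dropWhile, hc']
          simpa using ih3 out

-- B computes pvF of the word list
theorem pv_alt_norm (s : List Char) :
    pvFinal (s.foldl pvStep ([], 0)) = pvF (PySem.Chars.split₀ s) :=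
  (pv_scan s).1

-- ===== VERDICT (by name: the statement is the Claim_ definition above) =====
theorem get_firstname_initials_spec : Claim_equal_get_firstname_initials := by
  intro first_name _
  unfold Spec_get_firstname_initials get_firstname_initials get_firstname_initials_alt
  cases first_name with
  | none => rfl
  | some s =>
      by_cases hs : s.toList = []
      · simp [hs, Option.getD, pvFinal]
      · rw [Option.getD_some, pv_alt_norm]
        by_cases hstrip : PySem.Chars.strip s.toList = []
        · have hsplit : PySem.Chars.split₀ s.toList = [] := by
            rw [← pv_split₀_strip, hstrip]; rfl
          simp [hs, hstrip, hsplit, pvF]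
        · cases harr : PySem.Chars.split₀ s.toList with
          | nil =>
              have hstrip' : PySem.Chars.split₀ (PySem.Chars.strip s.toList) = [] := by
                rw [pv_split₀_strip, harr]
              simp [hs, hstrip, hstrip', pvF]
          | cons p rest =>
              have hne : ∀ x ∈ rest, x ≠ [] := by
                intro x hx
                exact pv_split₀_tokens_nonempty s.toList x (by rw [harr]; simp [hx])
              have hstrip' : PySem.Chars.split₀ (PySem.Chars.strip s.toList) = p :: rest := by
                rw [pv_split₀_strip, harr]
              simp only [ne_eq, hs, not_false_iff, if_true, hstrip, hstrip',
                reduceCtorEq, List.foldl_cons]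
              rw [show ([] : List Char) ++ p ++ [' '] = p ++ [' '] by simp]
              rw [pv_fold_tail rest _ hne]
              simp [pvF, List.append_assoc]
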